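-- pv_equiv track=rewrite | github.com/catsanzsh/TeamFlamesSMB3Clone | SMB34K1.0A.X.py | build_sprite_palette
-- ===== SOURCE A (Python) =====
-- TRANSPARENT_CHAR = 'T'
--
-- color_map = {
--     'R': (224, 0, 0),      # Red (Mario-like)
--     'B': (0, 100, 224),    # Blue (Mario-like)
--     'Y': (255, 255, 0),    # Yellow
--     'G': (0, 160, 0),      # Green
--     'W': (255, 255, 255),  # White
--     'K': (0, 0, 0),        # Black
--     'S': (255, 184, 152),  # Skin-tone (Mario-like)
--     'N': (160, 82, 45),    # Brown (Sienna-like for blocks/ground)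
--     'P': (255, 105, 180),  # Pink
--     'O': (255, 165, 0),    # Orange
--     'C': (0, 200, 200),    # Cyan/Sky Blue
--     TRANSPARENT_CHAR: (1, 2, 3, 0) # Special placeholder for transparency, actual color doesn't matter if skipped.
--                                    # Using an unlikely RGB with Alpha 0 for clarity.
-- }
--
-- def create_snes_palette(colors):
--     """Creates a palette list suitable for SNES-like color indexing."""
--     # The user's function just returns the list, which is fine.
--     # A palette in Pygame context is typically just a list of colors.
--     palette = []
--     for color in colors:
--         palette.append(color)
--     return palette
--
-- def build_sprite_palette(pixel_art_rows):
--     palette = [color_map[TRANSPARENT_CHAR]] # Index 0 is for transparency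
--
--     unique_colors_in_art = set()
--     for row_str in pixel_art_rows:
--         for char_code in row_str:
--             if char_code != TRANSPARENT_CHAR and char_code in color_map:
--                 unique_colors_in_art.add(color_map[char_code])
--
--     # Add unique colors, ensuring no duplicates with palette[0] if it happened to be a real color
--     for color in sorted(list(unique_colors_in_art), key=lambda c: (c[0],c[1],c[2])): # Sort for consistency
--         if color not in palette:
--             palette.append(color)
--     return create_snes_palette(palette)
-- ===== SOURCE B (Python) =====
-- TRANSPARENT_CHAR = 'T'
--
-- TRANSPARENT_COLOR = (1, 2, 3, 0)
--
-- # The opaque entries of the module's color table, pre-sorted by (r, g, b).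
-- _SORTED_COLORS = [
--     ('K', (0, 0, 0)),
--     ('B', (0, 100, 224)),
--     ('G', (0, 160, 0)),
--     ('C', (0, 200, 200)),
--     ('N', (160, 82, 45)),
--     ('R', (224, 0, 0)),
--     ('P', (255, 105, 180)),
--     ('O', (255, 165, 0)),
--     ('S', (255, 184, 152)),
--     ('Y', (255, 255, 0)),
--     ('W', (255, 255, 255)),
-- ]
--
-- def build_sprite_palette(pixel_art_rows):
--     present = set()
--     for row_str in pixel_art_rows:
--         present.update(row_str)
--     return [TRANSPARENT_COLOR] + [color for ch, color in _SORTED_COLORS if ch in present]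
-- ===== Notes on version B (the rewrite author's own statement) =====
-- stated objective: simpler
-- what changed: B collects the set of characters present in one pass and then scans a pre-sorted constant color table once, replacing A's per-pixel color-map filtering, runtime sort of the collected colors and duplicate-guarded append loop.
import Mathlib
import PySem

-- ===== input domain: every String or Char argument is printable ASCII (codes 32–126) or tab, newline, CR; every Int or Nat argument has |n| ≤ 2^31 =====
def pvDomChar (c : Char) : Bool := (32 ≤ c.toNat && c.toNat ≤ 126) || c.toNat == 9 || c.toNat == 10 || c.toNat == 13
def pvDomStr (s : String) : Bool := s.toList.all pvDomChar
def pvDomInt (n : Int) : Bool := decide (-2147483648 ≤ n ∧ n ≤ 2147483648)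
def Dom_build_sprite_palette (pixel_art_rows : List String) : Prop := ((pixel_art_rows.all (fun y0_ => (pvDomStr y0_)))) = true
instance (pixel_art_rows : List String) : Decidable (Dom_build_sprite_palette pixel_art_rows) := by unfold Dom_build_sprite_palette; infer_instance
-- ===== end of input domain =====

-- B replaces A's filter-inside-pixel-loop + runtime sort by one pass collecting the present
-- characters and a single scan of a pre-sorted constant color table (objective: simpler).

-- ===== PORT A =====
-- the module constant color_map (Python tuples become lists of Int)
def colorMap : PySem.Dict Char (List Int) := PySem.Dict.ofList
  [('R', [224, 0, 0]), ('B', [0, 100, 224]), ('Y', [255, 255, 0]), ('G', [0, 160, 0]),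
   ('W', [255, 255, 255]), ('K', [0, 0, 0]), ('S', [255, 184, 152]), ('N', [160, 82, 45]),
   ('P', [255, 105, 180]), ('O', [255, 165, 0]), ('C', [0, 200, 200]), ('T', [1, 2, 3, 0])]

def create_snes_palette (colors : List (List Int)) : List (List Int) :=
  colors.foldl (fun palette color => palette ++ [color]) []

def build_sprite_palette (pixel_art_rows : List String) : List (List Int) :=
  -- color_map[TRANSPARENT_CHAR]: the key 'T' is present, so no KeyError; getD is exact here
  let palette : List (List Int) := [colorMap.getD 'T' []]
  let unique_colors_in_art : PySem.Set (List Int) :=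
    pixel_art_rows.foldl (fun s row_str =>
      row_str.toList.foldl (fun s char_code =>
        if char_code ≠ 'T' ∧ colorMap.contains char_code then
          PySem.Set.add s (colorMap.getD char_code []) else s) s) PySem.Set.empty
  -- key=lambda c: (c[0],c[1],c[2]) on the collected length-3 colors = lexicographic list order
  -- instances written explicitly so the sort lemmas apply; same lexicographic order either way
  let palette := (@PySem.List.sorted _ _ List.instLinearOrder.toLT LinearOrder.toDecidableLT
      unique_colors_in_art (fun c => c) false).foldl
      (fun p color => if color ∉ p then p ++ [color] else p) palette
  create_snes_palette palette

-- ===== PORT B =====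
-- _SORTED_COLORS: the opaque entries of the color table, pre-sorted by (r, g, b)
def sortedColors : List (Char × List Int) :=
  [('K', [0, 0, 0]), ('B', [0, 100, 224]), ('G', [0, 160, 0]), ('C', [0, 200, 200]),
   ('N', [160, 82, 45]), ('R', [224, 0, 0]), ('P', [255, 105, 180]), ('O', [255, 165, 0]),
   ('S', [255, 184, 152]), ('Y', [255, 255, 0]), ('W', [255, 255, 255])]

def build_sprite_palette_alt (pixel_art_rows : List String) : List (List Int) :=
  let present : PySem.Set Char :=
    pixel_art_rows.foldl (fun s row_str => PySem.Set.update s row_str.toList) PySem.Set.empty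
  [1, 2, 3, 0] :: (sortedColors.filter (fun p => PySem.Set.contains present p.1)).map (·.2)

-- ===== PRECONDITION & SPEC =====
def Spec_build_sprite_palette (pixel_art_rows : List String) (out : List (List Int)) : Prop := out = build_sprite_palette_alt pixel_art_rows
instance (pixel_art_rows : List String) (out : List (List Int)) : Decidable (Spec_build_sprite_palette pixel_art_rows out) := by unfold Spec_build_sprite_palette; infer_instance

-- ===== CLAIM (what is proved, stated in full; the proofs are below) =====
def Claim_equal_build_sprite_palette : Prop := ∀ (pixel_art_rows : List String), Dom_build_sprite_palette pixel_art_rows → Spec_build_sprite_palette pixel_art_rows (build_sprite_palette pixel_art_rows)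

-- ===== LEMMAS AND PROOFS =====

-- membership in A's collected color set
theorem mem_collect_chars (x : List Int) (cs : List Char) (s : PySem.Set (List Int)) :
    x ∈ cs.foldl (fun s c =>
        if c ≠ 'T' ∧ colorMap.contains c then PySem.Set.add s (colorMap.getD c []) else s) s ↔
      x ∈ s ∨ ∃ c ∈ cs, c ≠ 'T' ∧ colorMap.contains c ∧ colorMap.getD c [] = x := by
  induction cs generalizing s with
  | nil => simp
  | cons c cs ih =>
    simp only [List.foldl_cons, List.mem_cons]
    split_ifs with h
    · rw [ih, PySem.Set.mem_add]
      constructor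
      · rintro ((hs | rfl) | ⟨c', hc', h'⟩)
        · exact Or.inl hs
        · exact Or.inr ⟨c, Or.inl rfl, h.1, h.2, rfl⟩
        · exact Or.inr ⟨c', Or.inr hc', h'⟩
      · rintro (hs | ⟨c', (rfl | hc'), h'⟩)
        · exact Or.inl (Or.inl hs)
        · exact Or.inl (Or.inr h'.2.2.symm)
        · exact Or.inr ⟨c', hc', h'⟩
    · rw [ih]
      constructor
      · rintro (hs | ⟨c', hc', h'⟩)
        · exact Or.inl hs
        · exact Or.inr ⟨c', Or.inr hc', h'⟩
      · rintro (hs | ⟨c', (rfl | hc'), h'⟩)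
        · exact Or.inl hs
        · exact absurd ⟨h'.1, h'.2.1⟩ h
        · exact Or.inr ⟨c', hc', h'⟩

theorem mem_collect (x : List Int) (rows : List String) (s : PySem.Set (List Int)) :
    x ∈ rows.foldl (fun s row =>
        row.toList.foldl (fun s c =>
          if c ≠ 'T' ∧ colorMap.contains c then PySem.Set.add s (colorMap.getD c []) else s) s) s ↔
      x ∈ s ∨ ∃ r ∈ rows, ∃ c ∈ r.toList, c ≠ 'T' ∧ colorMap.contains c ∧ colorMap.getD c [] = x := by
  induction rows generalizing s with
  | nil => simp
  | cons r rows ih =>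
    simp only [List.foldl_cons, List.mem_cons]
    rw [ih, mem_collect_chars]
    constructor
    · rintro ((hs | ⟨c, hc, h⟩) | ⟨r', hr', h⟩)
      · exact Or.inl hs
      · exact Or.inr ⟨r, Or.inl rfl, c, hc, h⟩
      · exact Or.inr ⟨r', Or.inr hr', h⟩
    · rintro (hs | ⟨r', (rfl | hr'), h⟩)
      · exact Or.inl (Or.inl hs)
      · exact Or.inl (Or.inr h)
      · exact Or.inr ⟨r', hr', h⟩

theorem nodup_collect_chars (cs : List Char) (s : PySem.Set (List Int)) (hs : s.Nodup) :
    (cs.foldl (fun s c =>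
        if c ≠ 'T' ∧ colorMap.contains c then PySem.Set.add s (colorMap.getD c []) else s) s).Nodup := by
  induction cs generalizing s with
  | nil => exact hs
  | cons c cs ih =>
    simp only [List.foldl_cons]
    split_ifs with h
    · exact ih _ (PySem.Set.nodup_add _ _ hs)
    · exact ih _ hs

theorem nodup_collect (rows : List String) (s : PySem.Set (List Int)) (hs : s.Nodup) :
    (rows.foldl (fun s row =>
        row.toList.foldl (fun s c =>
          if c ≠ 'T' ∧ colorMap.contains c then PySem.Set.add s (colorMap.getD c []) else s) s) s).Nodup := by
  induction rows generalizing s with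
  | nil => exact hs
  | cons r rows ih => exact ih _ (nodup_collect_chars r.toList s hs)

theorem mem_present (c : Char) (rows : List String) (s : PySem.Set Char) :
    c ∈ rows.foldl (fun s row => PySem.Set.update s row.toList) s ↔
      c ∈ s ∨ ∃ r ∈ rows, c ∈ r.toList := by
  induction rows generalizing s with
  | nil => simp
  | cons r rows ih =>
    simp only [List.foldl_cons, List.mem_cons]
    rw [ih, PySem.Set.mem_update]
    constructor
    · rintro ((hs | hr) | ⟨r', hr', h⟩)
      · exact Or.inl hs
      · exact Or.inr ⟨r, Or.inl rfl, hr⟩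
      · exact Or.inr ⟨r', Or.inr hr', h⟩
    · rintro (hs | ⟨r', (rfl | hr'), h⟩)
      · exact Or.inl (Or.inl hs)
      · exact Or.inl (Or.inr h)
      · exact Or.inr ⟨r', hr', h⟩

-- every admissible character names an entry of the pre-sorted table
theorem mem_sortedColors_of_contains (c : Char) (h1 : c ≠ 'T') (h2 : colorMap.contains c) :
    (c, colorMap.getD c []) ∈ sortedColors := by
  have hk : c ∈ colorMap.keys := (PySem.Dict.contains_iff_mem_keys colorMap c).mp h2
  have hkeys : colorMap.keys = ['R', 'B', 'Y', 'G', 'W', 'K', 'S', 'N', 'P', 'O', 'C', 'T'] := by decide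
  rw [hkeys] at hk
  fin_cases hk <;> first | (exact absurd rfl h1) | decide

theorem sortedColors_entry (p : Char × List Int) (hp : p ∈ sortedColors) :
    p.1 ≠ 'T' ∧ colorMap.contains p.1 ∧ colorMap.getD p.1 [] = p.2 := by
  fin_cases hp <;> refine ⟨by decide, by decide, by decide⟩

-- the duplicate guard loop with a nodup source disjoint from the accumulator just appends
theorem foldl_guard_append (xs : List (List Int)) (init : List (List Int))
    (hnd : xs.Nodup) (hdis : ∀ x ∈ xs, x ∉ init) :
    xs.foldl (fun p color => if color ∉ p then p ++ [color] else p) init = init ++ xs := by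
  induction xs generalizing init with
  | nil => simp
  | cons x xs ih =>
    simp only [List.foldl_cons]
    rw [if_pos (hdis x (List.mem_cons_self))]
    rw [ih (init ++ [x]) hnd.of_cons]
    · simp
    · intro y hy
      simp only [List.mem_append, List.mem_singleton]
      rintro (hyi | rfl)
      · exact hdis y (List.mem_cons_of_mem _ hy) hyi
      · exact (List.nodup_cons.mp hnd).1 hy

-- ===== VERDICT (by name: the statement is the Claim_ definition above) =====
theorem build_sprite_palette_spec : Claim_equal_build_sprite_palette := by
  intro rows _
  unfold Spec_build_sprite_palette build_sprite_palette build_sprite_palette_alt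
  dsimp only
  set L : List (List Int) :=
    (sortedColors.filter (fun p => PySem.Set.contains
      (rows.foldl (fun s row_str => PySem.Set.update s row_str.toList) PySem.Set.empty) p.1)).map (·.2)
    with hL
  have hLsub : L.Sublist (sortedColors.map (·.2)) := List.Sublist.map _ List.filter_sublist
  have hLnd : L.Nodup := (by decide : (sortedColors.map (·.2)).Nodup).sublist hLsub
  have hLpw : L.Pairwise (fun a b : List Int => a < b) :=
    (by decide : (sortedColors.map (·.2)).Pairwise (fun a b : List Int => a < b)).sublist hLsub
  have hund := nodup_collect rows PySem.Set.empty (by simp [PySem.Set.empty])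
  have hmemL : ∀ x : List Int, x ∈ L ↔ x ∈ (rows.foldl (fun s row =>
      row.toList.foldl (fun s c =>
        if c ≠ 'T' ∧ colorMap.contains c then PySem.Set.add s (colorMap.getD c []) else s) s)
      PySem.Set.empty) := by
    intro x
    rw [mem_collect]
    simp only [hL, List.mem_map, List.mem_filter, PySem.Set.empty, List.not_mem_nil, false_or]
    constructor
    · rintro ⟨p, ⟨hp, hpres⟩, rfl⟩
      obtain ⟨h1, h2, h3⟩ := sortedColors_entry p hp
      have := ((PySem.Set.contains_iff _ _).mp hpres)
      rw [mem_present] at this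
      simp only [List.not_mem_nil, false_or] at this
      obtain ⟨r, hr, hc⟩ := this
      exact ⟨r, hr, p.1, hc, h1, h2, h3⟩
    · rintro ⟨r, hr, c, hc, h1, h2, h3⟩
      refine ⟨(c, colorMap.getD c []), ⟨mem_sortedColors_of_contains c h1 h2, ?_⟩, h3⟩
      refine (PySem.Set.contains_iff _ _).mpr ?_
      rw [mem_present]
      exact Or.inr ⟨r, hr, hc⟩
  have hperm : L.Perm (rows.foldl (fun s row =>
      row.toList.foldl (fun s c =>
        if c ≠ 'T' ∧ colorMap.contains c then PySem.Set.add s (colorMap.getD c []) else s) s)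
      PySem.Set.empty) :=
    (List.perm_ext_iff_of_nodup hLnd hund).mpr hmemL
  have hsorted := PySem.List.sorted_eq_of_perm_of_pairwise_lt _ L (fun c => c) hperm hLpw
  rw [hsorted]
  have hT : (colorMap.getD 'T' [] : List Int) = [1, 2, 3, 0] := by decide
  have hdis : ∀ x ∈ L, x ∉ [colorMap.getD 'T' []] := by
    intro x hx
    have hx' : x ∈ sortedColors.map (·.2) := hLsub.mem hx
    have : ∀ y ∈ sortedColors.map (·.2), y ≠ ([1, 2, 3, 0] : List Int) := by decide
    simp only [hT, List.mem_singleton]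
    exact this x hx'
  rw [foldl_guard_append L _ hLnd hdis]
  unfold create_snes_palette
  rw [PySem.List.foldl_append_singleton]
  simp [hT]
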